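-- pv_equiv track=rewrite | github.com/UofT-EcoSystem/rlscope | rlscope/parser/dataframe.py | venn_as_overlap_dict
-- ===== SOURCE A (Python) =====
-- def venn_as_overlap_dict(V):
--     """
--     ##
--     ## To calcuate O[] from V[]:
--     ##
--     O[0,1,2] = V[0,1,2]
--     O[0,2] = V[0,1] - O[0,1,2]
--     O[1,2] = V[1,2] - O[0,1,2]
--     O[0,1] = V[0,1] - O[0,1,2]
--     O[0] = V[0] - O[0,1] - O[0,2] - O[0,1,2]
--     O[1] = V[1] - O[0,1] - O[1,2] - O[0,1,2]
--     O[2] = V[2] - O[0,2] - O[1,2] - O[0,1,2]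
--
--     PSEUDOCODE:
--     INPUT: V[region] -> size
--     OUTPUT: O[region] -> size
--
--     For region in sorted(V.keys(), key=lambda region: len( region)):
--         O[region] = V[region]
--         # Subtract all keys we've added so far to O that are a subset of region.
--         Sub_regions = set([k for k in O.keys() if k != region and k.issubset(region)])
--         For k in sub_regions:
--             O[region] -= O[k]
--
--     :param V:
--         venn_js dict
--     :return:
--     """
--     O = dict()
--     for region in reversed(sorted(V.keys(), key=lambda region: len(region))):
--         O[region] = V[region]
--         # Subtract all keys we've added so far to O that are a subset of region.
--         sub_regions = set([k for k in O.keys() if k != region and set(region).issubset(set(k))])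
--         for k in sub_regions:
--             O[region] -= O[k]
--
--     del_regions = set()
--     for region, size in O.items():
--         if size == 0:
--             del_regions.add(region)
--     for region in del_regions:
--         del O[region]
--
--     return O
-- ===== SOURCE B (Python) =====
-- def venn_as_overlap_dict(V):
--     keys = list(V.keys())
--     memo = {}
--
--     def overlap(r):
--         if r in memo:
--             return memo[r]
--         total = V[r]
--         for k in keys:
--             if k != r and set(r).issubset(set(k)):
--                 total -= overlap(k)
--         memo[r] = total
--         return total
--
--     order = reversed(sorted(keys, key=len))
--     return {r: v for r in order if (v := overlap(r)) != 0}
-- ===== Notes on version B (the rewrite author's own statement) =====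
-- stated objective: alternative
-- what changed: Replaces A's ordered forward-subtraction loop over the size-sorted key list by a memoized recursive overlap(r) = V[r] - sum of overlap(k) over strict superset keys, keeping only the second zero-filter pass.
-- outside the precondition, e.g. on venn_as_overlap_dict({(0, 1): 3, (0, 0): 5}): A returns {(0, 0): 5, (0, 1): 3}, B returns {(0, 0): 2, (0, 1): 3}; on venn_as_overlap_dict({(0,): 1, (0, 0): 2}): A returns {(0, 0): 2, (0,): -1}, B raises RecursionError
import Mathlib
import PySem

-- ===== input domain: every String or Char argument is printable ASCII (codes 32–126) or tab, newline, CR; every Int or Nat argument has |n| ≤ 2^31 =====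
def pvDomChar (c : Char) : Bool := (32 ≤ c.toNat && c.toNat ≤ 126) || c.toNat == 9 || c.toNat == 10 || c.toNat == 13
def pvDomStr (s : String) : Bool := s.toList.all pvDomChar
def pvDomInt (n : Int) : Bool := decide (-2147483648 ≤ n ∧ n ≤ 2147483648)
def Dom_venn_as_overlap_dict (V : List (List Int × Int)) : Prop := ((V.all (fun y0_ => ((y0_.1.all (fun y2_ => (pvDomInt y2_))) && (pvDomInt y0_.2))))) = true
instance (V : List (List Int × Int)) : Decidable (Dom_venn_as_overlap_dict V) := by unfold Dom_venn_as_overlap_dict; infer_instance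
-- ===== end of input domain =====

-- B replaces A's ordered forward-subtraction loop over a size-sorted dict by a memoized
-- recursive overlap function (ported as fuel-bounded recursion); objective: alternative.


-- ===== PORT A =====
-- set(region).issubset(set(k))
def pvSubset (r k : List Int) : Bool :=
  PySem.Set.issubset (PySem.Set.ofList r) (PySem.Set.ofList k)

def venn_as_overlap_dict (V : List (List Int × Int)) : List (List Int × Int) :=
  let Vd : PySem.Dict (List Int) Int := PySem.Dict.mk V
  let order := (PySem.List.sorted Vd.keys (fun r => r.length) false).reverse
  let O := order.foldl (fun (O : PySem.Dict (List Int) Int) region =>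
      -- O[region] = V[region]
      let O1 := O.insert region (Vd.getD region 0)
      -- sub_regions = set([k for k in O.keys() if k != region and set(region).issubset(set(k))])
      let subRegions : PySem.Set (List Int) :=
        PySem.Set.ofList (O1.keys.filter (fun k => decide (k ≠ region) && pvSubset region k))
      -- for k in sub_regions: O[region] -= O[k]   (order-insensitive: repeated subtraction)
      subRegions.foldl (fun O2 k => O2.insert region (O2.getD region 0 - O2.getD k 0)) O1)
    PySem.Dict.empty
  -- del_regions = {region for region, size in O.items() if size == 0}
  let delRegions : PySem.Set (List Int) :=
    O.items.foldl (fun s p => if p.2 == 0 then PySem.Set.add s p.1 else s) PySem.Set.empty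
  -- for region in del_regions: del O[region]   (order-insensitive: deleting distinct keys)
  (delRegions.foldl (fun O2 r => O2.erase r) O).items

-- ===== PORT B =====
-- overlap(r) = V[r] - sum of overlap(k) over keys k != r with set(r) <= set(k);
-- fuel only makes the recursion total in Lean (Python B's memoized recursion terminates on Pre_).
def overlapB (Vd : PySem.Dict (List Int) Int) (keys : List (List Int)) : Nat → List Int → Int
  | 0, _ => 0
  | fuel+1, r =>
      keys.foldl (fun total k =>
          if decide (k ≠ r) && pvSubset r k then total - overlapB Vd keys fuel k else total)
        (Vd.getD r 0)

def venn_as_overlap_dict_alt (V : List (List Int × Int)) : List (List Int × Int) :=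
  let Vd : PySem.Dict (List Int) Int := PySem.Dict.mk V
  let keys := Vd.keys
  let order := (PySem.List.sorted keys (fun r => r.length) false).reverse
  ((order.map (fun r => (r, overlapB Vd keys keys.length r))).filter (fun p => decide (p.2 ≠ 0)))

-- ===== PRECONDITION & SPEC =====
-- Pre_ excludes dicts containing a strict-superset key pair that is not strictly shorter
-- (possible only through keys with repeated elements) or two distinct keys denoting the same
-- element-set: there B's recursion does not terminate (RecursionError), or both programs return
-- and the two values are equally defensible resolutions of an unspecified equal-length tie.
def Pre_venn_as_overlap_dict (V : List (List Int × Int)) : Prop :=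
  (V.map Prod.fst).Pairwise
    (fun a b => a ≠ b ∧ ((∀ x ∈ a, x ∈ b) → a.length < b.length)
      ∧ ((∀ x ∈ b, x ∈ a) → b.length < a.length))
instance (V : List (List Int × Int)) : Decidable (Pre_venn_as_overlap_dict V) := by
  unfold Pre_venn_as_overlap_dict; infer_instance

def pvWitness_venn_as_overlap_dict : (List (List Int × Int)) :=
  [([0, 1, 2], 10), ([0, 1], 6), ([0], 6), ([2], 0)]

def Spec_venn_as_overlap_dict (V : List (List Int × Int)) (out : List (List Int × Int)) : Prop :=
  out = venn_as_overlap_dict_alt V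
instance (V : List (List Int × Int)) (out : List (List Int × Int)) :
    Decidable (Spec_venn_as_overlap_dict V out) := by
  unfold Spec_venn_as_overlap_dict; infer_instance

-- ===== CLAIM (what is proved, stated in full; the proofs are below) =====
def Claim_equal_venn_as_overlap_dict : Prop :=
  ∀ (V : List (List Int × Int)), Dom_venn_as_overlap_dict V → Pre_venn_as_overlap_dict V →
    Spec_venn_as_overlap_dict V (venn_as_overlap_dict V)

-- ===== LEMMAS AND PROOFS =====

theorem pvSubset_iff (r k : List Int) : pvSubset r k = true ↔ ∀ x ∈ r, x ∈ k := by
  simp [pvSubset, PySem.Set.issubset_iff, PySem.Set.mem_ofList]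

theorem pvSubset_refl (r : List Int) : pvSubset r r = true := by
  rw [pvSubset_iff]; intro x hx; exact hx

theorem pvSubset_trans {a b c : List Int} (h1 : pvSubset a b = true) (h2 : pvSubset b c = true) :
    pvSubset a c = true := by
  rw [pvSubset_iff] at *
  exact fun x hx => h2 x (h1 x hx)

-- strictly fewer keys contain a strict superset
theorem pvFilter_lt {l : List (List Int)} {p q : List Int → Bool} (hnd : l.Nodup)
    (hmono : ∀ x ∈ l, p x = true → q x = true) {a : List Int} (ha : a ∈ l)
    (hqa : q a = true) (hpa : p a = false) :
    (l.filter p).length < (l.filter q).length := by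
  induction l with
  | nil => cases ha
  | cons b t ih =>
    have hndt : t.Nodup := hnd.of_cons
    rcases List.mem_cons.mp ha with rfl | hat
    · have hle : (t.filter p).length ≤ (t.filter q).length := by
        rw [← List.countP_eq_length_filter, ← List.countP_eq_length_filter]
        exact List.countP_mono_left (fun x hx => hmono x (List.mem_cons_of_mem _ hx))
      simp only [List.filter_cons, hqa, hpa]
      simp only [Bool.false_eq_true, if_false, if_true, List.length_cons]
      omega
    · have hlt := ih hndt (fun x hx => hmono x (List.mem_cons_of_mem _ hx)) hat
      by_cases hpb : p b = true
      · have hqb := hmono b (List.mem_cons_self) hpb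
        simp [List.filter_cons, hpb, hqb]; omega
      · simp [List.filter_cons, hpb]
        by_cases hqb : q b = true <;> simp [hqb] <;> omega

-- foldl of conditional subtraction = initial minus the sum over the filtered list
theorem pvFoldlSub (l : List (List Int)) (c : List Int → Bool) (f : List Int → Int) (a : Int) :
    l.foldl (fun t k => if c k then t - f k else t) a = a - ((l.filter c).map f).sum := by
  induction l generalizing a with
  | nil => simp
  | cons x t ih =>
    simp only [List.foldl_cons, List.filter_cons]
    split_ifs with hx
    · rw [ih]
      simp only [List.map_cons, List.sum_cons]
      ring
    · exact ih a

-- ----- context facts bundled as hypotheses on the key list -----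

-- number of keys whose set contains r's set
def pvM (ks : List (List Int)) (r : List Int) : Nat :=
  (ks.filter (fun k => pvSubset r k)).length

theorem pvM_pos {ks : List (List Int)} {r : List Int} (hr : r ∈ ks) : 1 ≤ pvM ks r := by
  have : r ∈ ks.filter (fun k => pvSubset r k) := by
    rw [List.mem_filter]; exact ⟨hr, pvSubset_refl r⟩
  have := List.length_pos_of_mem this
  unfold pvM; omega

theorem pvM_le {ks : List (List Int)} (r : List Int) : pvM ks r ≤ ks.length :=
  List.length_filter_le _ _

-- under Pre_'s key discipline, a distinct superset key is strictly bigger and dominates fewer keys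
theorem pvM_lt {ks : List (List Int)} (hnd : ks.Nodup)
    (hne : ∀ a ∈ ks, ∀ b ∈ ks, a ≠ b → ¬(pvSubset a b = true ∧ pvSubset b a = true))
    {r k : List Int} (hr : r ∈ ks) (hk : k ∈ ks) (hkr : k ≠ r) (hsub : pvSubset r k = true) :
    pvM ks k < pvM ks r := by
  have hkrsub : pvSubset k r = false := by
    by_contra h
    have : pvSubset k r = true := by
      cases hkr' : pvSubset k r
      · exact absurd hkr' h
      · rfl
    exact hne r hr k hk (Ne.symm hkr) ⟨hsub, this⟩
  exact pvFilter_lt hnd (fun x _ hx => pvSubset_trans hsub hx) hr (pvSubset_refl r) hkrsub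

-- fuel does not matter once it dominates pvM
theorem overlapB_fuel (Vd : PySem.Dict (List Int) Int) (ks : List (List Int)) (hnd : ks.Nodup)
    (hne : ∀ a ∈ ks, ∀ b ∈ ks, a ≠ b → ¬(pvSubset a b = true ∧ pvSubset b a = true)) :
    ∀ (f1 : Nat) (r : List Int) (f2 : Nat), r ∈ ks → pvM ks r ≤ f1 → pvM ks r ≤ f2 →
      overlapB Vd ks f1 r = overlapB Vd ks f2 r := by
  intro f1
  induction f1 with
  | zero => intro r f2 hr h1 _; exact absurd h1 (by have := pvM_pos hr; omega)
  | succ f1 ih =>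
    intro r f2 hr h1 h2
    cases f2 with
    | zero => exact absurd h2 (by have := pvM_pos hr; omega)
    | succ f2 =>
      simp only [overlapB]
      apply PySem.List.foldl_congr_mem
      intro acc k hkmem
      by_cases hc : (decide (k ≠ r) && pvSubset r k) = true
      · have hc' := hc
        simp only [Bool.and_eq_true, decide_eq_true_eq] at hc'
        have hlt := pvM_lt hnd hne hr hkmem hc'.1 hc'.2
        simp only [if_pos hc]
        rw [ih k f2 hkmem (by omega) (by omega)]
      · simp only [if_neg hc]

-- evaluate overlapB with sufficient fuel as V[r] minus the sum over all superset keys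
theorem overlapB_eval (Vd : PySem.Dict (List Int) Int) (ks : List (List Int)) (hnd : ks.Nodup)
    (hne : ∀ a ∈ ks, ∀ b ∈ ks, a ≠ b → ¬(pvSubset a b = true ∧ pvSubset b a = true))
    {r : List Int} (hr : r ∈ ks) :
    overlapB Vd ks ks.length r =
      Vd.getD r 0 -
        (((ks.filter (fun k => decide (k ≠ r) && pvSubset r k)).map
          (fun k => overlapB Vd ks ks.length k)).sum) := by
  have hlen : 1 ≤ ks.length := List.length_pos_of_mem hr
  obtain ⟨t, ht⟩ : ∃ t, ks.length = t + 1 := ⟨ks.length - 1, by omega⟩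
  conv_lhs => rw [ht]
  simp only [overlapB]
  rw [pvFoldlSub]
  congr 1
  congr 1
  apply List.map_congr_left
  intro k hkmem
  have hkf := List.mem_filter.mp hkmem
  have hc' := hkf.2
  simp only [Bool.and_eq_true, decide_eq_true_eq] at hc'
  have hlt := pvM_lt hnd hne hr hkf.1 hc'.1 hc'.2
  have hle := pvM_le (ks := ks) r
  exact overlapB_fuel Vd ks hnd hne t k ks.length hkf.1 (by omega) (by omega)

-- find? over the mapped prefix finds the tabulated value
theorem pvFind_map (g : List Int → Int) (pre : List (List Int)) (k : List Int) (hk : k ∈ pre) :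
    (pre.map (fun r => (r, g r))).find? (fun p => p.1 == k) = some (k, g k) := by
  induction pre with
  | nil => cases hk
  | cons a t ih =>
    by_cases hak : a = k
    · subst hak
      rw [List.map_cons, List.find?_cons_of_pos (by simp)]
    · have hat : k ∈ t := by
        rcases List.mem_cons.mp hk with rfl | hat
        · exact absurd rfl hak
        · exact hat
      rw [List.map_cons, List.find?_cons_of_neg (by simp [hak]), ih hat]

theorem pvFind_map_none (g : List Int → Int) (pre : List (List Int)) (k : List Int)
    (hk : k ∉ pre) : (pre.map (fun r => (r, g r))).find? (fun p => p.1 == k) = none := by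
  rw [List.find?_eq_none]
  intro p hp
  obtain ⟨r, hr, rfl⟩ := List.mem_map.mp hp
  simp
  intro h; exact hk (h ▸ hr)

-- the inner subtraction loop only rewrites region's (last) slot
theorem pvSubFold (g : List Int → Int) (pre : List (List Int)) (region : List Int)
    (hreg : region ∉ pre) :
    ∀ (l : List (List Int)) (v : Int), (∀ k ∈ l, k ∈ pre) →
      (l.foldl (fun O2 k => O2.insert region (O2.getD region 0 - O2.getD k 0))
          (PySem.Dict.mk (pre.map (fun r => (r, g r)) ++ [(region, v)]))).items
        = pre.map (fun r => (r, g r)) ++ [(region, v - (l.map g).sum)] := by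
  intro l
  induction l with
  | nil => intro v _; simp [PySem.Dict.items]
  | cons k t ih =>
    intro v hsub
    have hkpre : k ∈ pre := hsub k List.mem_cons_self
    have hgetr :
        (PySem.Dict.mk (pre.map (fun r => (r, g r)) ++ [(region, v)])).getD region 0 = v := by
      simp only [PySem.Dict.getD, PySem.Dict.get?, PySem.Dict.items, List.find?_append]
      rw [pvFind_map_none g pre region hreg]
      simp [List.find?]
    have hgetk :
        (PySem.Dict.mk (pre.map (fun r => (r, g r)) ++ [(region, v)])).getD k 0 = g k := by
      simp only [PySem.Dict.getD, PySem.Dict.get?, PySem.Dict.items, List.find?_append]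
      rw [pvFind_map g pre k hkpre]
      simp
    have hins :
        (PySem.Dict.mk (pre.map (fun r => (r, g r)) ++ [(region, v)])).insert region (v - g k)
          = PySem.Dict.mk (pre.map (fun r => (r, g r)) ++ [(region, v - g k)]) := by
      have hcont :
          (PySem.Dict.mk (pre.map (fun r => (r, g r)) ++ [(region, v)])).contains region = true := by
        simp [PySem.Dict.contains, PySem.Dict.items]
      simp only [PySem.Dict.insert, hcont, if_pos]
      congr 1
      rw [List.map_append]
      congr 1
      · rw [List.map_map]
        apply List.map_congr_left
        intro r hr
        have : r ≠ region := fun h => hreg (h ▸ hr)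
        simp [this]
      · simp
    simp only [List.foldl_cons, hgetr, hgetk, hins]
    rw [ih (v - g k) (fun x hx => hsub x (List.mem_cons_of_mem _ hx))]
    simp only [List.map_cons, List.sum_cons]
    congr 2
    ring

-- building the deleted-keys set is collecting the zero-valued keys in order
theorem pvDelSet (items : List (List Int × Int)) :
    ∀ (s : PySem.Set (List Int)), s.Nodup → (∀ p ∈ items, p.1 ∉ s) →
      (items.map Prod.fst).Nodup →
      items.foldl (fun s p => if p.2 == 0 then PySem.Set.add s p.1 else s) s
        = s ++ (items.filter (fun p => p.2 == 0)).map Prod.fst := by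
  induction items with
  | nil => intro s _ _ _; simp
  | cons p t ih =>
    intro s hs hnotin hndf
    have hpf : ∀ q ∈ t, q.1 ≠ p.1 := by
      intro q hq
      have := (List.nodup_cons.mp hndf).1
      intro h
      exact this (h ▸ List.mem_map_of_mem hq)
    by_cases hp : (p.2 == 0) = true
    · have hadd : PySem.Set.add s p.1 = s ++ [p.1] :=
        PySem.Set.add_of_not_mem (hnotin p List.mem_cons_self)
      simp only [List.foldl_cons, hp, if_pos, hadd]
      rw [ih (s ++ [p.1]) (by
          simp [List.nodup_append, hs]
          intro a ha h
          exact hnotin p List.mem_cons_self (h ▸ ha))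
        (by intro q hq; simp; exact ⟨fun h => hnotin q (List.mem_cons_of_mem _ hq) h,
              hpf q hq⟩)
        (List.nodup_cons.mp hndf).2]
      simp [List.filter_cons, hp]
    · simp only [List.foldl_cons, hp]
      rw [if_neg (by simp_all), ih s hs
        (fun q hq => hnotin q (List.mem_cons_of_mem _ hq)) (List.nodup_cons.mp hndf).2]
      simp [List.filter_cons, hp]

-- a fold of dict deletions is one filter
theorem pvEraseFold (dl : List (List Int)) :
    ∀ (O : PySem.Dict (List Int) Int),
      (dl.foldl (fun O2 r => O2.erase r) O).items
        = O.items.filter (fun p => decide (p.1 ∉ dl)) := by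
  induction dl with
  | nil => intro O; simp
  | cons r t ih =>
    intro O
    simp only [List.foldl_cons]
    rw [ih]
    simp only [PySem.Dict.erase, PySem.Dict.items, List.filter_filter]
    apply List.filter_congr
    intro p _
    by_cases h1 : p.1 = r <;> simp [h1]

-- the main loop builds the tabulation of overlapB in processing order
theorem pvLoopA (Vd : PySem.Dict (List Int) Int) (ks : List (List Int)) (hnd : ks.Nodup)
    (hne : ∀ a ∈ ks, ∀ b ∈ ks, a ≠ b → ¬(pvSubset a b = true ∧ pvSubset b a = true))
    (hlt : ∀ a ∈ ks, ∀ b ∈ ks, a ≠ b → pvSubset a b = true → a.length < b.length)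
    (order : List (List Int)) (hperm : order.Perm ks)
    (hpw : order.Pairwise (fun a b => b.length ≤ a.length)) :
    ∀ (suf pre : List (List Int)), pre ++ suf = order →
      (suf.foldl (fun O region =>
          (PySem.Set.ofList
            ((O.insert region (Vd.getD region 0)).keys.filter
              (fun k => decide (k ≠ region) && pvSubset region k))).foldl
            (fun O2 k => O2.insert region (O2.getD region 0 - O2.getD k 0))
            (O.insert region (Vd.getD region 0)))
        (PySem.Dict.mk (pre.map (fun r => (r, overlapB Vd ks ks.length r))))).items
        = order.map (fun r => (r, overlapB Vd ks ks.length r)) := by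
  have hondp : order.Nodup := hperm.nodup_iff.mpr hnd
  intro suf
  induction suf with
  | nil => intro pre h; simp at h; subst h; simp [PySem.Dict.items]
  | cons region suf' ih =>
    intro pre horder
    set g := fun r => overlapB Vd ks ks.length r with hg
    have hpre_nd : (pre ++ region :: suf').Nodup := horder ▸ hondp
    have hregpre : region ∉ pre := by
      have := List.disjoint_of_nodup_append hpre_nd
      intro h; exact this h List.mem_cons_self
    have hregks : region ∈ ks := hperm.subset (horder ▸ (by simp : region ∈ pre ++ region :: suf'))
    -- step 1: the insert appends
    have hcont : (PySem.Dict.mk (pre.map (fun r => (r, g r)))).contains region = false := by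
      simp only [PySem.Dict.contains, PySem.Dict.items, List.any_eq_false]
      intro p hp
      obtain ⟨r, hr, rfl⟩ := List.mem_map.mp hp
      simp
      intro h; exact hregpre (h ▸ hr)
    have hins : (PySem.Dict.mk (pre.map (fun r => (r, g r)))).insert region (Vd.getD region 0)
        = PySem.Dict.mk (pre.map (fun r => (r, g r)) ++ [(region, Vd.getD region 0)]) := by
      simp only [PySem.Dict.insert, hcont]
      simp
    -- step 2: its keys
    have hkeys : (PySem.Dict.mk (pre.map (fun r => (r, g r))
        ++ [(region, Vd.getD region 0)])).keys = pre ++ [region] := by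
      simp only [PySem.Dict.keys, PySem.Dict.items, List.map_append, List.map_map,
        List.map_cons, List.map_nil]
      congr 1
      exact List.map_id pre
    -- step 3: the filtered sub-region list
    have hfilter : ((pre ++ [region]).filter (fun k => decide (k ≠ region) && pvSubset region k))
        = pre.filter (fun k => decide (k ≠ region) && pvSubset region k) := by
      rw [List.filter_append]
      simp
    have hprend : pre.Nodup := (List.nodup_append.mp hpre_nd).1
    have hsubnd : (pre.filter (fun k => decide (k ≠ region) && pvSubset region k)).Nodup :=
      hprend.filter _
    have hofl : PySem.Set.ofList (pre.filter (fun k => decide (k ≠ region) && pvSubset region k))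
        = pre.filter (fun k => decide (k ≠ region) && pvSubset region k) :=
      PySem.Set.ofList_eq_self_of_nodup _ hsubnd
    -- step 4: the subtraction loop
    have hsubfold := pvSubFold g pre region hregpre
      (pre.filter (fun k => decide (k ≠ region) && pvSubset region k)) (Vd.getD region 0)
      (fun k hk => (List.mem_filter.mp hk).1)
    -- step 5: the subtracted sum is g region's sum (same elements, both nodup)
    have hsetperm : (pre.filter (fun k => decide (k ≠ region) && pvSubset region k)).Perm
        (ks.filter (fun k => decide (k ≠ region) && pvSubset region k)) := by
      rw [List.perm_ext_iff_of_nodup hsubnd (hnd.filter _)]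
      intro x
      simp only [List.mem_filter]
      constructor
      · rintro ⟨hxpre, hc⟩
        exact ⟨hperm.subset (horder ▸ List.mem_append_left _ hxpre), hc⟩
      · rintro ⟨hxks, hc⟩
        have hc' := hc
        simp only [Bool.and_eq_true, decide_eq_true_eq] at hc'
        have hxne : x ≠ region := hc'.1
        have hxsub : pvSubset region x = true := hc'.2
        have hlen : region.length < x.length :=
          hlt region hregks x hxks (Ne.symm hxne) hxsub
        have hxorder : x ∈ pre ++ region :: suf' := horder ▸ hperm.symm.subset hxks
        rcases List.mem_append.mp hxorder with hxpre | hxtail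
        · exact ⟨hxpre, hc⟩
        · exfalso
          rcases List.mem_cons.mp hxtail with rfl | hxsuf
          · exact hxne rfl
          · have hpw' : (pre ++ region :: suf').Pairwise (fun a b => b.length ≤ a.length) :=
              horder ▸ hpw
            have := ((List.pairwise_append.mp hpw').2.1)
            have hle : x.length ≤ region.length :=
              (List.pairwise_cons.mp this).1 x hxsuf
            omega
    have hsum : ((pre.filter (fun k => decide (k ≠ region) && pvSubset region k)).map g).sum
        = ((ks.filter (fun k => decide (k ≠ region) && pvSubset region k)).map g).sum :=
      (hsetperm.map g).sum_eq
    have hval : Vd.getD region 0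
        - ((pre.filter (fun k => decide (k ≠ region) && pvSubset region k)).map g).sum
        = g region := by
      rw [hsum]
      exact (overlapB_eval Vd ks hnd hne hregks).symm
    -- assemble the step, then the IH
    simp only [List.foldl_cons]
    rw [hins, hkeys, hfilter, hofl]
    have hstep : ((pre.filter (fun k => decide (k ≠ region) && pvSubset region k)).foldl
        (fun O2 k => O2.insert region (O2.getD region 0 - O2.getD k 0))
        (PySem.Dict.mk (pre.map (fun r => (r, g r)) ++ [(region, Vd.getD region 0)])))
        = PySem.Dict.mk ((pre ++ [region]).map (fun r => (r, g r))) := by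
      apply PySem.Dict.ext
      rw [hsubfold, List.map_append, hval]
      rfl
    rw [hstep]
    exact ih (pre ++ [region]) (by simpa using horder)

-- ===== VERDICT (by name: the statement is the Claim_ definition above) =====
theorem venn_as_overlap_dict_spec : Claim_equal_venn_as_overlap_dict := by
  intro V _ hpre
  unfold Spec_venn_as_overlap_dict
  have hpwV := hpre
  simp only [venn_as_overlap_dict, venn_as_overlap_dict_alt]
  set Vd : PySem.Dict (List Int) Int := PySem.Dict.mk V with hVd
  set ks : List (List Int) := Vd.keys with hks
  have hksV : ks = V.map Prod.fst := rfl
  -- facts extracted from Pre_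
  have hpwKs : ks.Pairwise
      (fun a b => a ≠ b ∧ ((∀ x ∈ a, x ∈ b) → a.length < b.length)
        ∧ ((∀ x ∈ b, x ∈ a) → b.length < a.length)) := by
    rw [hksV]; exact hpwV
  have hsymm : Symmetric (fun a b : List Int =>
      a ≠ b ∧ ((∀ x ∈ a, x ∈ b) → a.length < b.length)
        ∧ ((∀ x ∈ b, x ∈ a) → b.length < a.length)) := by
    intro a b h
    exact ⟨h.1.symm, h.2.2, h.2.1⟩
  have hall : ∀ a ∈ ks, ∀ b ∈ ks, a ≠ b →
      (a ≠ b ∧ ((∀ x ∈ a, x ∈ b) → a.length < b.length)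
        ∧ ((∀ x ∈ b, x ∈ a) → b.length < a.length)) := by
    intro a ha b hb hab
    exact hpwKs.forall hsymm ha hb hab
  have hlt : ∀ a ∈ ks, ∀ b ∈ ks, a ≠ b → pvSubset a b = true → a.length < b.length := by
    intro a ha b hb hab hsub
    rw [pvSubset_iff] at hsub
    exact (hall a ha b hb hab).2.1 hsub
  have hne : ∀ a ∈ ks, ∀ b ∈ ks, a ≠ b → ¬(pvSubset a b = true ∧ pvSubset b a = true) := by
    intro a ha b hb hab hcon
    have h1 := hlt a ha b hb hab hcon.1
    have h2 := hlt b hb a ha (Ne.symm hab) hcon.2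
    omega
  have hnd : ks.Nodup := hpwKs.imp (fun h => h.1)
  -- the processing order
  set order : List (List Int) :=
    (PySem.List.sorted ks (fun r => r.length) false).reverse with horder
  have hperm : order.Perm ks := by
    rw [horder]
    exact (List.reverse_perm _).trans (PySem.List.sorted_perm ks (fun r => r.length) false)
  have hondp : order.Nodup := hperm.nodup_iff.mpr hnd
  have hpw : order.Pairwise (fun a b => b.length ≤ a.length) := by
    rw [horder, List.pairwise_reverse]
    exact PySem.List.sorted_pairwise ks (fun r => r.length)
  have hLfst : (order.map (fun r => (r, overlapB Vd ks ks.length r))).map Prod.fst = order := by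
    rw [List.map_map]
    exact List.map_id order
  -- the main loop tabulates overlapB in processing order
  have hloop := pvLoopA Vd ks hnd hne hlt order hperm hpw order [] rfl
  rw [show PySem.Dict.mk (List.map (fun r => (r, overlapB Vd ks ks.length r))
      ([] : List (List Int))) = PySem.Dict.empty from rfl] at hloop
  -- the deletion set collects the zero-valued keys
  have hdel0 := pvDelSet (order.map (fun r => (r, overlapB Vd ks ks.length r)))
    PySem.Set.empty List.nodup_nil (by intro p _; simp [PySem.Set.empty])
    (by rw [hLfst]; exact hondp)
  have hdel : (order.map (fun r => (r, overlapB Vd ks ks.length r))).foldl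
      (fun s p => if p.2 == 0 then PySem.Set.add s p.1 else s) PySem.Set.empty
      = ((order.map (fun r => (r, overlapB Vd ks ks.length r))).filter
          (fun p => p.2 == 0)).map Prod.fst := by
    rw [hdel0]
    rfl
  -- assemble
  rw [pvEraseFold, hloop, hdel]
  apply List.filter_congr
  intro p hp
  obtain ⟨r, hr, rfl⟩ := List.mem_map.mp hp
  have hiff : r ∈ ((order.map (fun r => (r, overlapB Vd ks ks.length r))).filter
      (fun p => p.2 == 0)).map Prod.fst ↔ overlapB Vd ks ks.length r = 0 := by
    simp only [List.mem_map, List.mem_filter]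
    constructor
    · rintro ⟨q, ⟨hqL, hq0⟩, hq1⟩
      obtain ⟨r', hr', rfl⟩ := hqL
      have : r' = r := hq1
      subst this
      simpa using hq0
    · intro h0
      exact ⟨(r, overlapB Vd ks ks.length r), ⟨⟨r, hr, rfl⟩, by simp [h0]⟩, rfl⟩
  rw [decide_eq_decide]
  rw [hiff]
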